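-- pv_equiv track=rewrite | github.com/SamboHassan/python-data-structure-algorithm | sequence/prefix_average.py | prefix_average
-- ===== SOURCE A (Python) =====
-- def prefix_average(S):
--     n = len(S)
--     A = [0] * n
--     for j in range(n):
--         total = 0
--         for i in range(j + 1):
--             total += S[i]
--         A[j] = total // (j + 1)
--     return A
-- ===== SOURCE B (Python) =====
-- def prefix_average(S):
--     A = []
--     total = 0
--     for j, x in enumerate(S):
--         total += x
--         A.append(total // (j + 1))
--     return A
-- ===== Notes on version B (the rewrite author's own statement) =====
-- stated objective: faster
-- what changed: Replaces the nested loop that re-sums the prefix for every index with a single pass that maintains a running cumulative sum and divides once per element.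
import Mathlib
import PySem

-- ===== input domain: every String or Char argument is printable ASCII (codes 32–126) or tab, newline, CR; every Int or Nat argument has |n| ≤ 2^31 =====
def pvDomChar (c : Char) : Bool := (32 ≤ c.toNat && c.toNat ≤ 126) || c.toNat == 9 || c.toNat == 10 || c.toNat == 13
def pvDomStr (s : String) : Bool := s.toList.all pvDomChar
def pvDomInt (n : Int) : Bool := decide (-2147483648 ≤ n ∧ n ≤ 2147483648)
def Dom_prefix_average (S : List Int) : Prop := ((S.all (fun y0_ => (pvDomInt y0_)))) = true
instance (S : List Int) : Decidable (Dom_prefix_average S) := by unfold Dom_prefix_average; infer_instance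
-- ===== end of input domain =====

-- B replaces A's nested re-summation by one pass with a running cumulative sum (asymptotically faster).

-- ===== PORT A =====
-- Literal port of A: A = [0]*n; for j in range(n): total = sum over i in range(j+1) of S[i]; A[j] = total // (j+1).
-- All indices are in range, so pyGetD/pySetD are exact here.
def prefix_average (S : List Int) : List Int :=
  let n : Nat := S.length
  (PySem.List.pyRange 0 (n : Int) 1).foldl
    (fun A j =>
      let total : Int :=
        (PySem.List.pyRange 0 (j + 1) 1).foldl (fun total i => total + PySem.List.pyGetD S i 0) 0
      PySem.List.pySetD A j (PySem.Int.floordiv total (j + 1)))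
    (List.replicate n 0)

-- ===== PORT B =====
-- Port of Source B: one pass over enumerate(S) carrying (A, total); A.append(total // (j+1)).
def prefix_average_alt (S : List Int) : List Int :=
  ((PySem.List.enumerate S 0).foldl
    (fun (st : List Int × Int) jx =>
      let total := st.2 + jx.2
      (st.1 ++ [PySem.Int.floordiv total (jx.1 + 1)], total))
    ([], 0)).1

-- ===== PRECONDITION & SPEC =====
def Spec_prefix_average (S : List Int) (out : List Int) : Prop := out = prefix_average_alt S
instance (S : List Int) (out : List Int) : Decidable (Spec_prefix_average S out) := by unfold Spec_prefix_average; infer_instance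

-- ===== CLAIM (what is proved, stated in full; the proofs are below) =====
def Claim_equal_prefix_average : Prop := ∀ (S : List Int), Dom_prefix_average S → Spec_prefix_average S (prefix_average S)

-- ===== LEMMAS AND PROOFS =====

-- inner loop of A computes the prefix sum
lemma pv_inner_sum (S : List Int) : ∀ j, j ≤ S.length →
    (List.range j).foldl (fun t (i : Nat) => t + PySem.List.pyGetD S (i : Int) 0) 0
      = (S.take j).sum := by
  intro j
  induction j with
  | zero => simp
  | succ j ih =>
    intro hj
    rw [List.range_succ, List.foldl_append, ih (by omega)]
    have hlt : j < S.length := by omega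
    simp [PySem.List.pyGetD_natCast, List.sum_take_succ _ _ hlt, List.getElem?_eq_getElem hlt]

-- A's outer loop of in-place assignments over range n is a map
lemma pv_foldl_set (f : Nat → Int) : ∀ (m k : Nat) (A : List Int), A.length = k + m →
    (List.range' k m).foldl (fun A j => A.set j (f j)) A
      = A.take k ++ (List.range' k m).map f := by
  intro m
  induction m with
  | zero =>
    intro k A hA
    simp only [Nat.add_zero] at hA
    simp [List.take_of_length_le hA.le]
  | succ m ih =>
    intro k A hA
    rw [List.range'_succ, List.foldl_cons, List.map_cons,
        ih (k + 1) (A.set k (f k)) (by simp; omega)]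
    have hk : k < A.length := by omega
    rw [List.set_eq_take_append_cons_drop, if_pos hk]
    have hlen : (A.take k).length = k := by simp [Nat.le_of_lt hk]
    simp [List.take_append, List.take_take, hlen]

-- B's fold over enumerate, characterised with generalized start index and accumulators
lemma pv_alt_go : ∀ (xs : List Int) (s : Nat) (acc : List Int) (t : Int),
    ((PySem.List.enumerate xs (s : Int)).foldl
      (fun (st : List Int × Int) jx =>
        (st.1 ++ [PySem.Int.floordiv (st.2 + jx.2) (jx.1 + 1)], st.2 + jx.2)) (acc, t)).1
    = acc ++ (List.range xs.length).map
        (fun i => PySem.Int.floordiv (t + (xs.take (i + 1)).sum) ((s : Int) + 1 + i)) := by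
  intro xs
  induction xs with
  | nil => intro s acc t; simp [PySem.List.enumerate_nil]
  | cons x xs ih =>
    intro s acc t
    rw [PySem.List.enumerate_cons, List.foldl_cons]
    have hs : (s : Int) + 1 = ((s + 1 : Nat) : Int) := by push_cast; ring
    rw [hs, ih (s + 1) _ (t + x)]
    rw [List.length_cons, List.range_succ_eq_map, List.map_cons, List.map_map]
    simp only [List.append_assoc, List.singleton_append]
    congr 1
    congr 1
    · simp
    · apply List.map_congr_left
      intro i _
      simp only [Function.comp, List.take_succ_cons, List.sum_cons]
      congr 1
      · ring
      · push_cast; ring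

-- A equals the map of integer prefix averages
lemma pv_a_eq (S : List Int) :
    prefix_average S
      = (List.range S.length).map
          (fun j => PySem.Int.floordiv ((S.take (j + 1)).sum) ((j : Int) + 1)) := by
  unfold prefix_average
  simp only [PySem.List.pyRange_zero_natCast, List.foldl_map]
  have step : ∀ (A : List Int) (k : Nat),
      PySem.List.pySetD A (k : Int) (PySem.Int.floordiv
          ((PySem.List.pyRange 0 ((k : Int) + 1) 1).foldl
            (fun total i => total + PySem.List.pyGetD S i 0) 0)
          ((k : Int) + 1))
      = A.set k (PySem.Int.floordiv
          ((List.range (k + 1)).foldl (fun t (i : Nat) => t + PySem.List.pyGetD S (i : Int) 0) 0)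
          ((k : Int) + 1)) := by
    intro A k
    have h1 : ((k : Int) + 1) = ((k + 1 : Nat) : Int) := by push_cast; ring
    rw [h1, PySem.List.pyRange_zero_natCast, List.foldl_map, PySem.List.pySetD_natCast, ← h1]
  rw [PySem.List.foldl_congr_mem _ _
        (fun A k => A.set k (PySem.Int.floordiv
          ((List.range (k + 1)).foldl (fun t (i : Nat) => t + PySem.List.pyGetD S (i : Int) 0) 0)
          ((k : Int) + 1))) _
        (fun A k _ => step A k)]
  rw [List.range_eq_range', pv_foldl_set _ S.length 0 _ (by simp)]
  simp only [List.take_zero, List.nil_append, ← List.range_eq_range']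
  apply List.map_congr_left
  intro j hj
  rw [pv_inner_sum S (j + 1) (by simp [List.mem_range] at hj; omega)]

theorem pv_spec_aux (S : List Int) : prefix_average S = prefix_average_alt S := by
  rw [pv_a_eq]
  unfold prefix_average_alt
  have h := pv_alt_go S 0 [] 0
  simp only [Nat.cast_zero, List.nil_append] at h
  simp only []
  rw [h]
  apply List.map_congr_left
  intro j _
  congr 1
  · ring
  · push_cast; ring

-- ===== VERDICT (by name: the statement is the Claim_ definition above) =====
theorem prefix_average_spec : Claim_equal_prefix_average := by
  intro S _
  exact pv_spec_aux S
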